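-- pv_equiv track=rewrite | github.com/MoCCo329/algo_solving | programers/2022_KAKAO_TECH_INTERNSHIP_MBTI.py | solution
-- ===== SOURCE A (Python) =====
-- def solution(survey, choices):
--     char_sum = {'R': 0, 'T': 0, 'C': 0, 'F': 0, 'J': 0, 'M': 0, 'A': 0, 'N': 0}
--     char_type = [['R', 'T'], ['C', 'F'], ['J', 'M'], ['A', 'N']]
--
--     for i in range(len(survey)):
--         res = int(choices[i])
--         if choices[i] <= 3:
--             char_sum[survey[i][0]] += 4 - choices[i]
--         elif choices[i] >= 5:
--             char_sum[survey[i][1]] += choices[i] - 4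
--
--     ans = []
--     for front, back in char_type:
--         if char_sum[front] >= char_sum[back]:
--             ans.append(front)
--         else:
--             ans.append(back)
--     return ''.join(ans)
-- ===== SOURCE B (Python) =====
-- def solution(survey, choices):
--     def score(ch):
--         return sum(4 - c for s, c in zip(survey, choices) if c <= 3 and s[0] == ch) \
--              + sum(c - 4 for s, c in zip(survey, choices) if c >= 5 and s[1] == ch)
--     return ''.join(f if score(f) >= score(g) else g
--                    for f, g in [('R', 'T'), ('C', 'F'), ('J', 'M'), ('A', 'N')])
-- ===== Notes on version B (the rewrite author's own statement) =====
-- stated objective: simpler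
-- what changed: Replaces A's stateful single pass that mutates eight dict counters with a stateless staged computation: a pure per-letter score function (two filtered sums over the zipped survey) evaluated independently for each of the eight letters, then the four winners are joined.
import Mathlib
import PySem

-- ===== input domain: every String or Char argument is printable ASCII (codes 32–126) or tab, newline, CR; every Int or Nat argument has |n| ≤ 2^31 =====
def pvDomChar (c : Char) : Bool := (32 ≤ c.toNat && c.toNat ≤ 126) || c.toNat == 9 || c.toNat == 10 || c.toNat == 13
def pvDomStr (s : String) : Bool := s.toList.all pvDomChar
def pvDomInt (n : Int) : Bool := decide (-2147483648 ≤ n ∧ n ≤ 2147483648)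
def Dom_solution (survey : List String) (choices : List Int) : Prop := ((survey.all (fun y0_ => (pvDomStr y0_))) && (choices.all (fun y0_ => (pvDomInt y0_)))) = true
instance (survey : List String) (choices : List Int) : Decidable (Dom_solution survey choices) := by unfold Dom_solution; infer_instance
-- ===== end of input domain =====

-- B replaces A's stateful pass mutating eight dict counters with a stateless per-letter score
-- function (two filtered sums over the zipped survey) evaluated for each letter of each axis.


-- ===== PORT A =====
-- one loop iteration of A (dict keyed by the single char; Python's keys are 1-char strings)
def aStep (d : PySem.Dict Char Int) (s : String) (c : Int) : PySem.Dict Char Int :=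
  let _res := c        -- 'res = int(choices[i])' — int() of an int, unused
  if c ≤ 3 then
    d.modify ((PySem.Str.pyGet? s 0).getD 'R') 0 (· + (4 - c))   -- the getD defaults are unreachable under Pre_
  else if 5 ≤ c then
    d.modify ((PySem.Str.pyGet? s 1).getD 'R') 0 (· + (c - 4))
  else d

def solution (survey : List String) (choices : List Int) : String :=
  let char_sum : PySem.Dict Char Int :=
    PySem.Dict.ofList [('R',0),('T',0),('C',0),('F',0),('J',0),('M',0),('A',0),('N',0)]
  let char_type : List (Char × Char) := [('R','T'),('C','F'),('J','M'),('A','N')]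
  let char_sum :=
    (PySem.List.pyRange 0 (survey.length : Int) 1).foldl
      (fun d i => aStep d ((PySem.List.pyGet? survey i).getD "") ((PySem.List.pyGet? choices i).getD 0))
      char_sum
  let ans := char_type.foldl
    (fun a p => if char_sum.getD p.1 0 ≥ char_sum.getD p.2 0 then a ++ [p.1] else a ++ [p.2]) []
  String.ofList ans

-- ===== PORT B =====
-- s[0] / s[1]; the ' ' defaults are unreachable under Pre_ (B's Python raises IndexError there, like A)
def frontCh (s : String) : Char := (PySem.Str.pyGet? s 0).getD ' '
def backCh (s : String) : Char := (PySem.Str.pyGet? s 1).getD ' '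

-- score(ch): the two filtered generator sums of Source B
def scoreB (survey : List String) (choices : List Int) (ch : Char) : Int :=
  (((survey.zip choices).filter (fun p => decide (p.2 ≤ 3) && (frontCh p.1 == ch))).map
      (fun p => 4 - p.2)).sum
  + (((survey.zip choices).filter (fun p => decide (5 ≤ p.2) && (backCh p.1 == ch))).map
      (fun p => p.2 - 4)).sum

def solution_alt (survey : List String) (choices : List Int) : String :=
  String.ofList ((([('R','T'),('C','F'),('J','M'),('A','N')] : List (Char × Char))).map
    (fun q => if scoreB survey choices q.1 ≥ scoreB survey choices q.2 then q.1 else q.2))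

-- ===== PRECONDITION & SPEC =====
def okChar (c : Char) : Bool := c ∈ (['R','T','C','F','J','M','A','N'] : List Char)

-- Pre_: exactly the inputs on which Python A returns (no IndexError from choices[i] / survey[i][j],
-- no KeyError from char_sum[letter]): enough choices, and each accessed survey char is one of the 8 letters.
def Pre_solution (survey : List String) (choices : List Int) : Prop :=
  survey.length ≤ choices.length ∧
  ∀ p ∈ survey.zip choices,
    (p.2 ≤ 3 → (PySem.Str.pyGet? p.1 0).map okChar = some true) ∧
    (5 ≤ p.2 → (PySem.Str.pyGet? p.1 1).map okChar = some true)
instance (survey : List String) (choices : List Int) : Decidable (Pre_solution survey choices) := by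
  unfold Pre_solution; infer_instance

def pvWitness_solution : List String × List Int := (["TR", "CF", "JM"], [7, 1, 4])

def Spec_solution (survey : List String) (choices : List Int) (out : String) : Prop := out = solution_alt survey choices
instance (survey : List String) (choices : List Int) (out : String) : Decidable (Spec_solution survey choices out) := by unfold Spec_solution; infer_instance

-- ===== CLAIM (what is proved, stated in full; the proofs are below) =====
def Claim_equal_solution : Prop := ∀ (survey : List String) (choices : List Int), Dom_solution survey choices → Pre_solution survey choices → Spec_solution survey choices (solution survey choices)

-- ===== LEMMAS AND PROOFS =====

-- the index loop over two parallel lists is the fold over their zip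
lemma foldl_pyRange_two {α β γ : Type} (xs : List α) (ys : List β)
    (g : γ → α → β → γ) (dx : α) (dy : β) (init : γ) (h : xs.length ≤ ys.length) :
    (PySem.List.pyRange 0 (xs.length : Int) 1).foldl
      (fun acc i => g acc ((PySem.List.pyGet? xs i).getD dx) ((PySem.List.pyGet? ys i).getD dy)) init
    = (xs.zip ys).foldl (fun acc p => g acc p.1 p.2) init := by
  rw [show (xs.length : Int) = ((xs.zip ys).length : Int) by simp [List.length_zip]; omega]
  rw [← PySem.List.foldl_pyRange_zero_pyGetD' (xs.zip ys) (dx, dy) (fun acc p => g acc p.1 p.2) init]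
  apply PySem.List.foldl_congr_mem
  intro acc i hi
  rw [PySem.List.mem_pyRange_one] at hi
  obtain ⟨h0, hlt⟩ := hi
  have hx : i.toNat < xs.length := by simp [List.length_zip] at hlt; omega
  have hy : i.toNat < ys.length := by omega
  rw [PySem.List.pyGetD, PySem.List.pyGet?_of_nonneg _ h0, PySem.List.pyGet?_of_nonneg _ h0,
      PySem.List.pyGet?_of_nonneg _ h0]
  simp [hx, hy, List.getElem_zip]

-- the contribution of one question to letter ch (proof-only bookkeeping)
def contrib (ch : Char) (p : String × Int) : Int :=
  if p.2 ≤ 3 ∧ frontCh p.1 = ch then 4 - p.2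
  else if 5 ≤ p.2 ∧ backCh p.1 = ch then p.2 - 4
  else 0

-- B's two filtered sums equal the sum of per-question contributions
lemma score_eq_sum_contrib (l : List (String × Int)) (ch : Char) :
    ((l.filter (fun p => decide (p.2 ≤ 3) && (frontCh p.1 == ch))).map (fun p => 4 - p.2)).sum
    + ((l.filter (fun p => decide (5 ≤ p.2) && (backCh p.1 == ch))).map (fun p => p.2 - 4)).sum
    = (l.map (contrib ch)).sum := by
  induction l with
  | nil => simp
  | cons p t ih =>
    by_cases h1 : p.2 ≤ 3 ∧ frontCh p.1 = ch
    · have h5 : ¬ (5 ≤ p.2) := by omega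
      simp [List.filter, contrib, h1.1, h1.2, h5, ← ih]; ring
    · by_cases h2 : 5 ≤ p.2 ∧ backCh p.1 = ch
      · have h3 : ¬ (p.2 ≤ 3) := by omega
        simp [List.filter, contrib, h2.1, h2.2, h3, ← ih]; ring
      · push Not at h1 h2
        have e1 : (decide (p.2 ≤ 3) && (frontCh p.1 == ch)) = false := by
          by_cases h : p.2 ≤ 3
          · simp [h]; exact h1 h
          · simp [h]
        have e2 : (decide (5 ≤ p.2) && (backCh p.1 == ch)) = false := by
          by_cases h : 5 ≤ p.2
          · simp [h]; exact h2 h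
          · simp [h]
        have e3 : contrib ch p = 0 := by
          unfold contrib
          split_ifs with a b
          · exact absurd a.2 (h1 a.1)
          · exact absurd b.2 (h2 b.1)
          · rfl
        simp [List.filter, e1, e2, e3, ← ih]

-- loop invariant: A's counter for any of the 8 letters grows by the contributions
lemma fold_getD (l : List (String × Int)) (d : PySem.Dict Char Int) (ch : Char)
    (hok : ∀ p ∈ l, (p.2 ≤ 3 → (PySem.Str.pyGet? p.1 0).map okChar = some true) ∧
                    (5 ≤ p.2 → (PySem.Str.pyGet? p.1 1).map okChar = some true)) :
    (l.foldl (fun d p => aStep d p.1 p.2) d).getD ch 0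
      = d.getD ch 0 + (l.map (contrib ch)).sum := by
  induction l generalizing d with
  | nil => simp
  | cons p t ih =>
    have hstep : (aStep d p.1 p.2).getD ch 0 = d.getD ch 0 + contrib ch p := by
      by_cases h3 : p.2 ≤ 3
      · obtain ⟨c0, hc0⟩ : ∃ c0, PySem.Str.pyGet? p.1 0 = some c0 := by
          have := (hok p List.mem_cons_self).1 h3
          cases hg : PySem.Str.pyGet? p.1 0 with
          | none => rw [hg] at this; simp at this
          | some c0 => exact ⟨c0, rfl⟩
        have hf : frontCh p.1 = c0 := by unfold frontCh; rw [hc0]; rfl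
        have ha : aStep d p.1 p.2 = d.modify c0 0 (· + (4 - p.2)) := by
          unfold aStep; rw [if_pos h3, hc0]; rfl
        rw [ha, PySem.Dict.getD_modify]
        by_cases he : ch = c0
        · subst he
          rw [if_pos rfl]
          have hz : contrib ch p = 4 - p.2 := by unfold contrib; rw [if_pos ⟨h3, hf⟩]
          rw [hz]
        · rw [if_neg he]
          have hz : contrib ch p = 0 := by
            unfold contrib
            rw [if_neg (fun a => he (a.2.symm.trans hf)),
                if_neg (fun b => absurd b.1 (by omega))]
          rw [hz]; ring
      · by_cases h5 : 5 ≤ p.2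
        · obtain ⟨c1, hc1⟩ : ∃ c1, PySem.Str.pyGet? p.1 1 = some c1 := by
            have := (hok p List.mem_cons_self).2 h5
            cases hg : PySem.Str.pyGet? p.1 1 with
            | none => rw [hg] at this; simp at this
            | some c1 => exact ⟨c1, rfl⟩
          have hb : backCh p.1 = c1 := by unfold backCh; rw [hc1]; rfl
          have ha : aStep d p.1 p.2 = d.modify c1 0 (· + (p.2 - 4)) := by
            unfold aStep; rw [if_neg h3, if_pos h5, hc1]; rfl
          rw [ha, PySem.Dict.getD_modify]
          by_cases he : ch = c1
          · subst he
            rw [if_pos rfl]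
            have hz : contrib ch p = p.2 - 4 := by
              unfold contrib
              rw [if_neg (fun a => h3 a.1), if_pos ⟨h5, hb⟩]
            rw [hz]
          · rw [if_neg he]
            have hz : contrib ch p = 0 := by
              unfold contrib
              rw [if_neg (fun a => h3 a.1), if_neg (fun b => he (b.2.symm.trans hb))]
            rw [hz]; ring
        · have hz : contrib ch p = 0 := by
            unfold contrib; rw [if_neg (fun a => h3 a.1), if_neg (fun b => h5 b.1)]
          have ha : aStep d p.1 p.2 = d := by unfold aStep; rw [if_neg h3, if_neg h5]
          rw [ha, hz]; ring
    rw [List.foldl_cons, ih _ (fun q hq => hok q (List.mem_cons_of_mem p hq)), hstep]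
    simp; ring

-- ===== VERDICT (by name: the statement is the Claim_ definition above) =====
theorem solution_spec : Claim_equal_solution := by
  intro survey choices _ hpre
  obtain ⟨hlen, hok⟩ := hpre
  unfold Spec_solution solution solution_alt
  dsimp only
  rw [foldl_pyRange_two survey choices (fun d s c => aStep d s c) "" 0 _ hlen]
  have hD : ∀ ch : Char,
      ((survey.zip choices).foldl (fun d p => aStep d p.1 p.2)
        (PySem.Dict.ofList [('R',0),('T',0),('C',0),('F',0),('J',0),('M',0),('A',0),('N',0)])).getD ch 0
      = (PySem.Dict.ofList [('R',0),('T',0),('C',0),('F',0),('J',0),('M',0),('A',0),('N',0)] :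
          PySem.Dict Char Int).getD ch 0 + ((survey.zip choices).map (contrib ch)).sum :=
    fun ch => fold_getD (survey.zip choices) _ ch hok
  have hs : ∀ ch ∈ (['R','T','C','F','J','M','A','N'] : List Char),
      ((survey.zip choices).foldl (fun d p => aStep d p.1 p.2)
        (PySem.Dict.ofList [('R',0),('T',0),('C',0),('F',0),('J',0),('M',0),('A',0),('N',0)])).getD ch 0
      = scoreB survey choices ch := by
    intro ch hch
    have h0 : (PySem.Dict.ofList [('R',(0:Int)),('T',0),('C',0),('F',0),('J',0),('M',0),('A',0),('N',0)]).getD ch 0 = 0 := by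
      fin_cases hch <;> decide
    rw [hD ch, h0, scoreB, score_eq_sum_contrib]
    ring
  simp only [List.foldl, List.map]
  rw [hs 'R' (by decide), hs 'T' (by decide), hs 'C' (by decide), hs 'F' (by decide),
      hs 'J' (by decide), hs 'M' (by decide), hs 'A' (by decide), hs 'N' (by decide)]
  by_cases h1 : scoreB survey choices 'T' ≤ scoreB survey choices 'R' <;>
  by_cases h2 : scoreB survey choices 'F' ≤ scoreB survey choices 'C' <;>
  by_cases h3 : scoreB survey choices 'M' ≤ scoreB survey choices 'J' <;>
  by_cases h4 : scoreB survey choices 'N' ≤ scoreB survey choices 'A' <;>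
    simp [h1, h2, h3, h4, ge_iff_le]
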